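-- pv_equiv track=rewrite | github.com/bluewaves25/swift-ai-trader | waves_quant_agi/engine_agents/core/learning_layer/training_module.py | _validate_coordination_entry
-- ===== SOURCE A (Python) =====
-- from typing import Dict, Any, List
--
-- def _validate_coordination_entry(entry: Dict[str, Any]) -> bool:
--     """Validate individual coordination entry."""
--     try:
--         required_fields = ["data_type", "timestamp"]
--
--         # Check required fields
--         if not all(field in entry for field in required_fields):
--             return False
--
--         # Check data type specific requirements
--         data_type = entry.get("data_type")
--
--         if data_type == "health_check":
--             return "agent_name" in entry and "health_status" in entry
--         elif data_type == "timing_sync":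
--             return "agent_name" in entry and "sync_status" in entry
--         elif data_type == "agent_status":
--             return "agent_name" in entry and "status" in entry
--         elif data_type == "coordination_event":
--             return "event_type" in entry and "event_id" in entry
--         else:
--             return False
--
--     except Exception:
--         return False
-- ===== SOURCE B (Python) =====
-- _VC_BIT = {"data_type": 1, "timestamp": 2, "agent_name": 4, "health_status": 8,
--            "sync_status": 16, "status": 32, "event_type": 64, "event_id": 128}
--
-- # required-key bitmask per data_type (always includes data_type|timestamp = 3)
-- _VC_MASK = {"health_check": 15, "timing_sync": 23,
--             "agent_status": 39, "coordination_event": 195}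
--
-- def _validate_coordination_entry(entry):
--     """Validate via one pass that accumulates a bitmask of relevant keys."""
--     try:
--         mask = 0
--         dtype = None
--         for k, v in entry.items():
--             mask |= _VC_BIT.get(k, 0)
--             if dtype is None and k == "data_type":
--                 dtype = v
--         need = _VC_MASK.get(dtype, 0)
--         return need != 0 and mask & need == need
--     except Exception:
--         return False
-- ===== Notes on version B (the rewrite author's own statement) =====
-- stated objective: alternative
-- what changed: Instead of repeated per-key membership scans behind a required-fields guard and a four-way if/elif chain, B makes a single pass over the entry items accumulating a bitmask of the eight relevant keys (capturing data_type's value on the way), then decides validity by one bitwise mask comparison against a per-type required-bit constant.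
import Mathlib
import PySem

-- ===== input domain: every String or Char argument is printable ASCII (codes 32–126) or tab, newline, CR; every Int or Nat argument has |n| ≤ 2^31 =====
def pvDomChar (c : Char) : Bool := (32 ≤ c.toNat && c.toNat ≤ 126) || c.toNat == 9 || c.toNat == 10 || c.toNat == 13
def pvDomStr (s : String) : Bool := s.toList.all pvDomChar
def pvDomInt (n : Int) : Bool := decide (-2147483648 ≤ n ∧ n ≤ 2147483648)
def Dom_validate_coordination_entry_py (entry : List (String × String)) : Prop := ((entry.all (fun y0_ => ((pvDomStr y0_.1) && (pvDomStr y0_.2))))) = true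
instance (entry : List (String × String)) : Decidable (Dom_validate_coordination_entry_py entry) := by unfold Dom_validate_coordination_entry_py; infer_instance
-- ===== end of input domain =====

-- B replaces A's repeated per-key membership scans (guard + if/elif chain) by one pass over the
-- items accumulating a bitmask of relevant keys, then a single bitwise comparison per data_type.


-- ===== PORT A =====
-- Python dict lookup / membership on the association list (first match)
def vcGet? (entry : List (String × String)) (k : String) : Option String :=
  (entry.find? (fun p => p.1 == k)).map Prod.snd

def vcContains (entry : List (String × String)) (k : String) : Bool :=
  (entry.find? (fun p => p.1 == k)).isSome

def validate_coordination_entry_py (entry : List (String × String)) : Bool :=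
  if !((["data_type", "timestamp"]).all (fun f => vcContains entry f)) then false
  else
    let data_type := vcGet? entry "data_type"
    if data_type == some "health_check" then
      vcContains entry "agent_name" && vcContains entry "health_status"
    else if data_type == some "timing_sync" then
      vcContains entry "agent_name" && vcContains entry "sync_status"
    else if data_type == some "agent_status" then
      vcContains entry "agent_name" && vcContains entry "status"
    else if data_type == some "coordination_event" then
      vcContains entry "event_type" && vcContains entry "event_id"
    else false

-- ===== PORT B =====
-- _VC_BIT.get(k, 0)
def vcBitTable : List (String × Nat) :=
  [("data_type", 1), ("timestamp", 2), ("agent_name", 4), ("health_status", 8),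
   ("sync_status", 16), ("status", 32), ("event_type", 64), ("event_id", 128)]

def vcBitOf (k : String) : Nat :=
  ((vcBitTable.find? (fun p => p.1 == k)).map Prod.snd).getD 0

-- _VC_MASK
def vcMaskTable : List (String × Nat) :=
  [("health_check", 15), ("timing_sync", 23), ("agent_status", 39), ("coordination_event", 195)]

-- loop body: mask |= bit; first data_type value captured
def vcStep (st : Nat × Option String) (kv : String × String) : Nat × Option String :=
  (st.1 ||| vcBitOf kv.1,
   if st.2.isNone && (kv.1 == "data_type") then some kv.2 else st.2)

def validate_coordination_entry_py_alt (entry : List (String × String)) : Bool :=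
  let st := entry.foldl vcStep (0, none)
  let need : Nat :=
    match st.2 with
    | none => 0                              -- _VC_MASK.get(None, 0)
    | some s => ((vcMaskTable.find? (fun p => p.1 == s)).map Prod.snd).getD 0
  need != 0 && (st.1 &&& need == need)

-- ===== PRECONDITION & SPEC =====
def Spec_validate_coordination_entry_py (entry : List (String × String)) (out : Bool) : Prop := out = validate_coordination_entry_py_alt entry
instance (entry : List (String × String)) (out : Bool) : Decidable (Spec_validate_coordination_entry_py entry out) := by unfold Spec_validate_coordination_entry_py; infer_instance

-- ===== CLAIM (what is proved, stated in full; the proofs are below) =====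
def Claim_equal_validate_coordination_entry_py : Prop := ∀ (entry : List (String × String)), Dom_validate_coordination_entry_py entry → Spec_validate_coordination_entry_py entry (validate_coordination_entry_py entry)

-- ===== LEMMAS AND PROOFS =====

-- the fold's mask, bit by bit
theorem vc_fold_testBit (entry : List (String × String)) (m : Nat) (d : Option String) (i : Nat) :
    ((entry.foldl vcStep (m, d)).1).testBit i
      = (m.testBit i || entry.any (fun p => (vcBitOf p.1).testBit i)) := by
  induction entry generalizing m d with
  | nil => simp
  | cons kv t ih =>
      simp only [List.foldl_cons, List.any_cons, vcStep]
      rw [ih, Nat.testBit_or, Bool.or_assoc]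

-- the fold's dtype = first "data_type" value (when started from none)
theorem vc_fold_dtype_some (entry : List (String × String)) (m : Nat) (x : String) :
    (entry.foldl vcStep (m, some x)).2 = some x := by
  induction entry generalizing m with
  | nil => rfl
  | cons kv t ih => simpa [vcStep] using ih _

theorem vc_fold_dtype (entry : List (String × String)) (m : Nat) :
    (entry.foldl vcStep (m, none)).2 = vcGet? entry "data_type" := by
  induction entry generalizing m with
  | nil => simp [vcGet?]
  | cons kv t ih =>
      by_cases h : kv.1 == "data_type"
      · have e : vcStep (m, none) kv = (m ||| vcBitOf kv.1, some kv.2) := by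
          simp [vcStep, h]
        simp [List.foldl_cons, e, vc_fold_dtype_some, vcGet?, List.find?_cons, h]
      · have e : vcStep (m, none) kv = (m ||| vcBitOf kv.1, none) := by
          simp [vcStep, h]
        rw [List.foldl_cons, e, ih]
        simp [vcGet?, List.find?_cons, h]

-- bitmask subset test
theorem vc_mask_iff (mask need : Nat) :
    (mask &&& need = need) ↔ ∀ i, need.testBit i = true → mask.testBit i = true := by
  constructor
  · intro h i hi
    have := congrArg (Nat.testBit · i) h
    simp only [Nat.testBit_and, hi, Bool.and_true] at this
    exact this
  · intro h
    apply Nat.eq_of_testBit_eq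
    intro i
    rw [Nat.testBit_and]
    cases hn : need.testBit i with
    | false => simp
    | true => simp [h i hn]

-- vcContains as an `any`
theorem vc_contains_any (entry : List (String × String)) (k : String) :
    vcContains entry k = entry.any (fun p => p.1 == k) := by
  induction entry with
  | nil => simp [vcContains]
  | cons kv t ih =>
      simp only [vcContains, List.find?_cons, List.any_cons] at *
      by_cases h : kv.1 == k <;> simp [h, ih]

-- closed form of the bit-table lookup
theorem vcBitOf_eq (k : String) :
    vcBitOf k = (if k == "data_type" then 1 else if k == "timestamp" then 2 else if k == "agent_name" then 4 else if k == "health_status" then 8 else if k == "sync_status" then 16 else if k == "status" then 32 else if k == "event_type" then 64 else if k == "event_id" then 128 else 0 : Nat) := by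
  unfold vcBitOf vcBitTable
  split_ifs <;> simp_all [List.find?_cons, beq_eq_false_iff_ne, ne_comm]

theorem vc_bit0 (k : String) : (vcBitOf k).testBit 0 = (k == "data_type") := by
  rw [vcBitOf_eq]
  split_ifs <;> (try simp_all) <;> decide

theorem vc_bit1 (k : String) : (vcBitOf k).testBit 1 = (k == "timestamp") := by
  rw [vcBitOf_eq]
  split_ifs <;> (try simp_all) <;> decide

theorem vc_bit2 (k : String) : (vcBitOf k).testBit 2 = (k == "agent_name") := by
  rw [vcBitOf_eq]
  split_ifs <;> (try simp_all) <;> decide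

theorem vc_bit3 (k : String) : (vcBitOf k).testBit 3 = (k == "health_status") := by
  rw [vcBitOf_eq]
  split_ifs <;> (try simp_all) <;> decide

theorem vc_bit4 (k : String) : (vcBitOf k).testBit 4 = (k == "sync_status") := by
  rw [vcBitOf_eq]
  split_ifs <;> (try simp_all) <;> decide

theorem vc_bit5 (k : String) : (vcBitOf k).testBit 5 = (k == "status") := by
  rw [vcBitOf_eq]
  split_ifs <;> (try simp_all) <;> decide

theorem vc_bit6 (k : String) : (vcBitOf k).testBit 6 = (k == "event_type") := by
  rw [vcBitOf_eq]
  split_ifs <;> (try simp_all) <;> decide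

theorem vc_bit7 (k : String) : (vcBitOf k).testBit 7 = (k == "event_id") := by
  rw [vcBitOf_eq]
  split_ifs <;> (try simp_all) <;> decide

-- the mask's bit i (i < 8) is the membership of the i-th relevant key
theorem vc_mask_bit (entry : List (String × String)) (i : Nat) (k : String)
    (hb : ∀ s, (vcBitOf s).testBit i = (s == k)) :
    ((entry.foldl vcStep (0, none)).1).testBit i = vcContains entry k := by
  rw [vc_fold_testBit, vc_contains_any]
  simp only [Nat.zero_testBit, Bool.false_or]
  congr 1
  funext p
  exact hb p.1

theorem vc_contains_of_get (entry : List (String × String)) (k v : String)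
    (h : vcGet? entry k = some v) : vcContains entry k = true := by
  unfold vcGet? at h
  unfold vcContains
  cases hf : entry.find? (fun p => p.1 == k) with
  | none => rw [hf] at h; simp at h
  | some p => simp

theorem vc_mask15 (mask : Nat) :
    (mask &&& 15 = 15) ↔ (mask.testBit 0 = true ∧ mask.testBit 1 = true ∧ mask.testBit 2 = true ∧ mask.testBit 3 = true) := by
  rw [vc_mask_iff]
  constructor
  · intro h
    exact ⟨h 0 (by decide), h 1 (by decide), h 2 (by decide), h 3 (by decide)⟩
  · rintro ⟨a, b, c, d⟩ i hi
    have h8 : i < 8 := by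
      by_contra hge
      have hlt : (15 : Nat) < 2 ^ i :=
        lt_of_lt_of_le (by norm_num : (15 : Nat) < 2 ^ 8) (Nat.pow_le_pow_right (by norm_num) (by omega))
      rw [Nat.testBit_eq_false_of_lt hlt] at hi
      exact absurd hi (by simp)
    interval_cases i <;> first | assumption | exact absurd hi (by decide)

theorem vc_mask23 (mask : Nat) :
    (mask &&& 23 = 23) ↔ (mask.testBit 0 = true ∧ mask.testBit 1 = true ∧ mask.testBit 2 = true ∧ mask.testBit 4 = true) := by
  rw [vc_mask_iff]
  constructor
  · intro h
    exact ⟨h 0 (by decide), h 1 (by decide), h 2 (by decide), h 4 (by decide)⟩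
  · rintro ⟨a, b, c, d⟩ i hi
    have h8 : i < 8 := by
      by_contra hge
      have hlt : (23 : Nat) < 2 ^ i :=
        lt_of_lt_of_le (by norm_num : (23 : Nat) < 2 ^ 8) (Nat.pow_le_pow_right (by norm_num) (by omega))
      rw [Nat.testBit_eq_false_of_lt hlt] at hi
      exact absurd hi (by simp)
    interval_cases i <;> first | assumption | exact absurd hi (by decide)

theorem vc_mask39 (mask : Nat) :
    (mask &&& 39 = 39) ↔ (mask.testBit 0 = true ∧ mask.testBit 1 = true ∧ mask.testBit 2 = true ∧ mask.testBit 5 = true) := by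
  rw [vc_mask_iff]
  constructor
  · intro h
    exact ⟨h 0 (by decide), h 1 (by decide), h 2 (by decide), h 5 (by decide)⟩
  · rintro ⟨a, b, c, d⟩ i hi
    have h8 : i < 8 := by
      by_contra hge
      have hlt : (39 : Nat) < 2 ^ i :=
        lt_of_lt_of_le (by norm_num : (39 : Nat) < 2 ^ 8) (Nat.pow_le_pow_right (by norm_num) (by omega))
      rw [Nat.testBit_eq_false_of_lt hlt] at hi
      exact absurd hi (by simp)
    interval_cases i <;> first | assumption | exact absurd hi (by decide)

theorem vc_mask195 (mask : Nat) :
    (mask &&& 195 = 195) ↔ (mask.testBit 0 = true ∧ mask.testBit 1 = true ∧ mask.testBit 6 = true ∧ mask.testBit 7 = true) := by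
  rw [vc_mask_iff]
  constructor
  · intro h
    exact ⟨h 0 (by decide), h 1 (by decide), h 6 (by decide), h 7 (by decide)⟩
  · rintro ⟨a, b, c, d⟩ i hi
    have h8 : i < 8 := by
      by_contra hge
      have hlt : (195 : Nat) < 2 ^ i :=
        lt_of_lt_of_le (by norm_num : (195 : Nat) < 2 ^ 8) (Nat.pow_le_pow_right (by norm_num) (by omega))
      rw [Nat.testBit_eq_false_of_lt hlt] at hi
      exact absurd hi (by simp)
    interval_cases i <;> first | assumption | exact absurd hi (by decide)

-- ===== VERDICT (by name: the statement is the Claim_ definition above) =====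
theorem validate_coordination_entry_py_spec : Claim_equal_validate_coordination_entry_py := by
  intro entry _
  show validate_coordination_entry_py entry = validate_coordination_entry_py_alt entry
  have b0 := vc_mask_bit entry 0 "data_type" vc_bit0
  have b1 := vc_mask_bit entry 1 "timestamp" vc_bit1
  have b2 := vc_mask_bit entry 2 "agent_name" vc_bit2
  have b3 := vc_mask_bit entry 3 "health_status" vc_bit3
  have b4 := vc_mask_bit entry 4 "sync_status" vc_bit4
  have b5 := vc_mask_bit entry 5 "status" vc_bit5
  have b6 := vc_mask_bit entry 6 "event_type" vc_bit6
  have b7 := vc_mask_bit entry 7 "event_id" vc_bit7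
  unfold validate_coordination_entry_py validate_coordination_entry_py_alt
  simp only [vc_fold_dtype]
  cases hdt : vcGet? entry "data_type" with
  | none =>
      have hdc : vcContains entry "data_type" = false := by
        simp only [vcGet?, Option.map_eq_none_iff] at hdt
        simp [vcContains, hdt]
      simp [hdc]
  | some s =>
      have hdc : vcContains entry "data_type" = true := vc_contains_of_get _ _ _ hdt
      simp only [List.all_cons, List.all_nil, Bool.and_true, hdc, Bool.true_and, hdt]
      by_cases h1 : s = "health_check"
      · subst h1
        rw [Bool.eq_iff_iff]
        simp only [vcMaskTable, List.find?_cons, Option.map_some, Option.getD_some,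
          bne_iff_ne, beq_iff_eq, Bool.and_eq_true, decide_eq_true_eq, Bool.ite_eq_true_distrib,
          vc_mask15, b0, b1, b2, b3, hdc]
        cases hts : vcContains entry "timestamp" <;> simp_all [vc_mask15, b1]
      · by_cases h2 : s = "timing_sync"
        · subst h2
          rw [Bool.eq_iff_iff]
          simp only [vcMaskTable, List.find?_cons, Option.map_some, Option.getD_some,
            bne_iff_ne, beq_iff_eq, Bool.and_eq_true, decide_eq_true_eq, Bool.ite_eq_true_distrib,
            vc_mask23, b0, b1, b2, b4, hdc]
          cases hts : vcContains entry "timestamp" <;> simp_all [vc_mask23, b1]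
        · by_cases h3 : s = "agent_status"
          · subst h3
            rw [Bool.eq_iff_iff]
            simp only [vcMaskTable, List.find?_cons, Option.map_some, Option.getD_some,
              bne_iff_ne, beq_iff_eq, Bool.and_eq_true, decide_eq_true_eq, Bool.ite_eq_true_distrib,
              vc_mask39, b0, b1, b2, b5, hdc]
            cases hts : vcContains entry "timestamp" <;> simp_all [vc_mask39, b1]
          · by_cases h4 : s = "coordination_event"
            · subst h4
              rw [Bool.eq_iff_iff]
              simp only [vcMaskTable, List.find?_cons, Option.map_some, Option.getD_some,
                bne_iff_ne, beq_iff_eq, Bool.and_eq_true, decide_eq_true_eq, Bool.ite_eq_true_distrib,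
                vc_mask195, b0, b1, b6, b7, hdc]
              cases hts : vcContains entry "timestamp" <;> simp_all [vc_mask195, b1]
            · have hn : (vcMaskTable.find? (fun p => p.1 == s)).map Prod.snd = none := by
                rw [Option.map_eq_none_iff, List.find?_eq_none]
                intro p hp
                simp only [vcMaskTable, List.mem_cons, List.not_mem_nil, or_false] at hp
                rcases hp with rfl | rfl | rfl | rfl <;> simp only [beq_iff_eq] <;>
                  first
                  | exact fun h => h1 h.symm
                  | exact fun h => h2 h.symm
                  | exact fun h => h3 h.symm
                  | exact fun h => h4 h.symm
              rw [hn]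
              simp [h1, h2, h3, h4]
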